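-- pv_equiv track=rewrite | github.com/Jerry25137/H_company-workflow-automation | ENA_data-processing/ENA_Merge_files v4.8.1 (UI).py | find_data_ranges
-- ===== SOURCE A (Python) =====
-- def find_data_ranges(DATA, column_index):
--     Start, End = None, None
--     for i, row in enumerate(DATA[1:]):
--         value = row[column_index]
--         if value != "":  # 如果有資料
--             if Start is None:
--                 Start = i  # 記錄起始位置
--             End = i        # 更新終止位置
--     Start += 1
--     End   += 1
--     return Start, End
-- ===== SOURCE B (Python) =====
-- def find_data_ranges(DATA, column_index):
--     rows = DATA[1:]
--     Start, End = None, None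
--     for i, row in enumerate(rows):
--         if row[column_index] != "":
--             Start = i
--             break
--     for i, row in reversed(list(enumerate(rows))):
--         if row[column_index] != "":
--             End = i
--             break
--     return Start + 1, End + 1
-- ===== Notes on version B (the rewrite author's own statement) =====
-- stated objective: alternative
-- what changed: A's single combined pass that threads both a first-match and a last-match accumulator through every row is replaced by two independent early-exit scans: a forward scan that breaks at the first non-empty value and a backward scan over the reversed enumeration that breaks at the last one.
import Mathlib
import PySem

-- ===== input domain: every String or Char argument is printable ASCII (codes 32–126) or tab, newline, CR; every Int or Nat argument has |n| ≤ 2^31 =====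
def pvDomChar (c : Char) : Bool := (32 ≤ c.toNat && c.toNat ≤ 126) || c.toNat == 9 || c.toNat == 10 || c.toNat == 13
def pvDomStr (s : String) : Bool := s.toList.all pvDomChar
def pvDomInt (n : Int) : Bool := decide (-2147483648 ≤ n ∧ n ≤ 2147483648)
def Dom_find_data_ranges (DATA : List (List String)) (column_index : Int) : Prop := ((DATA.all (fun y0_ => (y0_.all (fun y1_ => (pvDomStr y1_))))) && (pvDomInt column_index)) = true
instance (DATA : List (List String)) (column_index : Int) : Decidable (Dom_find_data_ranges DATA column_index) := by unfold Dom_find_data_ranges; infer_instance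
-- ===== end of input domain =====

-- B replaces A's single pass carrying two accumulators by two independent early-exit scans
-- (forward for Start, backward for End); return values agree wherever A returns.

-- ===== PORT A =====
-- loop body of A: value = row[column_index]; if value != "": if Start is None: Start = i; End = i
-- (Python raises IndexError where pyGet? is none; those inputs are outside Pre_, the fold skips them)
def pvStepA (ci : Int) (st : Option Int × Option Int) (p : Int × List String) :
    Option Int × Option Int :=
  match PySem.List.pyGet? p.2 ci with
  | some v => if v ≠ "" then ((match st.1 with | none => some p.1 | some s => some s), some p.1) else st
  | none => st

def find_data_ranges (DATA : List (List String)) (column_index : Int) : Int × Int :=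
  let res := (PySem.List.enumerate (PySem.List.slice DATA (some 1) none)).foldl
      (pvStepA column_index) (none, none)
  -- Start += 1; End += 1; Python raises TypeError when Start/End are still None (outside Pre_)
  match res with
  | (some s, some e) => (s + 1, e + 1)
  | _ => (0, 0)

-- ===== PORT B =====
-- row[column_index] != ""  (none, i.e. Python IndexError, only outside Pre_)
def pvNonEmpty (ci : Int) (p : Int × List String) : Bool :=
  (PySem.List.pyGet? p.2 ci).getD "" != ""

def find_data_ranges_alt (DATA : List (List String)) (column_index : Int) : Int × Int :=
  let rows := PySem.List.slice DATA (some 1) none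
  -- forward scan, break at first non-empty
  let start := (PySem.List.enumerate rows).find? (pvNonEmpty column_index)
  -- backward scan over reversed(list(enumerate(rows))), break at first non-empty found
  let stop := ((PySem.List.enumerate rows).reverse).find? (pvNonEmpty column_index)
  match start with
  | none => (0, 0)   -- Start still None: Python raises TypeError (outside Pre_)
  | some s =>
    match stop with
    | none => (0, 0) -- End still None: Python raises TypeError (outside Pre_)
    | some e => (s.1 + 1, e.1 + 1)

-- ===== PRECONDITION & SPEC =====
-- Pre_: exactly where Python A returns normally — every row of DATA[1:] admits column_index
-- (else IndexError) and some such value is non-empty (else Start stays None and 'Start += 1' raises TypeError).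
def Pre_find_data_ranges (DATA : List (List String)) (column_index : Int) : Prop :=
  (∀ row ∈ DATA.drop 1, PySem.List.pyGet? row column_index ≠ none) ∧
  (∃ row ∈ DATA.drop 1, (PySem.List.pyGet? row column_index).getD "" ≠ "")
instance (DATA : List (List String)) (column_index : Int) : Decidable (Pre_find_data_ranges DATA column_index) := by unfold Pre_find_data_ranges; infer_instance

def pvWitness_find_data_ranges : List (List String) × Int := ([["h"], [""], ["x"], ["y"]], 0)

def Spec_find_data_ranges (DATA : List (List String)) (column_index : Int) (out : Int × Int) : Prop := out = find_data_ranges_alt DATA column_index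
instance (DATA : List (List String)) (column_index : Int) (out : Int × Int) : Decidable (Spec_find_data_ranges DATA column_index out) := by unfold Spec_find_data_ranges; infer_instance

-- ===== CLAIM (what is proved, stated in full; the proofs are below) =====
def Claim_equal_find_data_ranges : Prop := ∀ (DATA : List (List String)) (column_index : Int), Dom_find_data_ranges DATA column_index → Pre_find_data_ranges DATA column_index → Spec_find_data_ranges DATA column_index (find_data_ranges DATA column_index)

-- ===== LEMMAS AND PROOFS =====

-- A's combined fold computes (first match or initial Start, last match or initial End).
theorem pvLoop_spec (ci : Int) (L : List (Int × List String)) (s e : Option Int) :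
    L.foldl (pvStepA ci) (s, e) =
      (s.or ((L.find? (pvNonEmpty ci)).map (·.1)),
       ((L.reverse.find? (pvNonEmpty ci)).map (·.1)).or e) := by
  induction L generalizing s e with
  | nil => simp
  | cons x L IH =>
    have hstep : pvStepA ci (s, e) x =
        if pvNonEmpty ci x then (s.or (some x.1), some x.1) else (s, e) := by
      unfold pvStepA pvNonEmpty
      cases h : PySem.List.pyGet? x.2 ci with
      | none => simp
      | some v =>
        by_cases hv : v = "" <;> cases s <;> simp [hv]
    rw [List.foldl_cons, hstep]
    by_cases hx : pvNonEmpty ci x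
    · rw [if_pos hx, IH]
      rw [List.reverse_cons, List.find?_append, List.find?_cons_of_pos hx]
      cases hL : L.reverse.find? (pvNonEmpty ci) <;>
        cases hF : L.find? (pvNonEmpty ci) <;>
          cases s <;> simp [List.find?_cons_of_pos hx]
    · rw [if_neg hx, IH]
      rw [List.reverse_cons, List.find?_append, List.find?_cons_of_neg hx]
      simp [List.find?_cons_of_neg hx]

-- ===== VERDICT (by name: the statement is the Claim_ definition above) =====
theorem find_data_ranges_spec : Claim_equal_find_data_ranges := by
  intro DATA ci _ _
  unfold Spec_find_data_ranges find_data_ranges find_data_ranges_alt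
  rw [pvLoop_spec]
  cases hF : (PySem.List.enumerate (PySem.List.slice DATA (some 1) none)).find? (pvNonEmpty ci) <;>
    cases hR : ((PySem.List.enumerate (PySem.List.slice DATA (some 1) none)).reverse).find? (pvNonEmpty ci) <;>
      simp [hF, hR]
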